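-- pv_equiv track=rewrite | github.com/pypi-data/pypi-mirror-381 | packages/ecomp/ecomp-0.1.1.tar.gz/ecomp-0.1.1/ecomp/compression/pipeline.py | _mst_sequence_order
-- ===== SOURCE A (Python) =====
-- def _mst_sequence_order(dist_matrix: list[list[int]]) -> list[int]:
--     num_sequences = len(dist_matrix)
--     if num_sequences == 0:
--         return []
--     visited = [False] * num_sequences
--     key = [float("inf")] * num_sequences
--     parent = [-1] * num_sequences
--     key[0] = 0
--     for _ in range(num_sequences):
--         candidates = [idx for idx in range(num_sequences) if not visited[idx]]
--         u = min(candidates, key=lambda idx: key[idx])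
--         visited[u] = True
--         for v in range(num_sequences):
--             if visited[v] or v == u:
--                 continue
--             dist = dist_matrix[u][v]
--             if dist < key[v]:
--                 key[v] = dist
--                 parent[v] = u
--
--     adjacency: list[list[int]] = [[] for _ in range(num_sequences)]
--     for child, par in enumerate(parent):
--         if par >= 0:
--             adjacency[par].append(child)
--
--     order: list[int] = []
--     stack = [0]
--     while stack:
--         node = stack.pop()
--         order.append(node)
--         children = sorted(adjacency[node], key=lambda idx: dist_matrix[node][idx], reverse=True)
--         stack.extend(children)
--     return order
-- ===== SOURCE B (Python) =====
-- def _mst_sequence_order(dist_matrix: list[list[int]]) -> list[int]: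
--     n = len(dist_matrix)
--     if n == 0:
--         return []
--     INF = float("inf")
--     key = [INF] * n
--     key[0] = 0
--     parent = [-1] * n
--     in_tree = [False] * n
--     for _ in range(n):
--         u = -1
--         for i in range(n):
--             if not in_tree[i] and (u < 0 or key[i] < key[u]):
--                 u = i
--         in_tree[u] = True
--         for v in range(n):
--             if not in_tree[v] and dist_matrix[u][v] < key[v]:
--                 key[v] = dist_matrix[u][v]
--                 parent[v] = u
--     order: list[int] = []
--     def visit(u: int) -> None:
--         order.append(u)
--         for c in sorted((c for c in reversed(range(n)) if parent[c] == u),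
--                         key=lambda c: dist_matrix[u][c]):
--             visit(c)
--     visit(0)
--     return order
-- ===== Notes on version B (the rewrite author's own statement) =====
-- stated objective: alternative
-- what changed: Prim's vertex selection becomes a single inline argmin scan instead of building a candidate list and calling min(), the adjacency-list construction pass is dropped entirely (children are recomputed from the parent array on demand), and the explicit stack-based DFS is replaced by a recursive pre-order visit that recurses into children in ascending-distance order (scanning indices high-to-low so equal-distance ties reproduce the stack's pop order).
-- outside the precondition, e.g. on _mst_sequence_order([[0, 5], []]): A returns [0, 1], B returns [0, 1]
import Mathlib
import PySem

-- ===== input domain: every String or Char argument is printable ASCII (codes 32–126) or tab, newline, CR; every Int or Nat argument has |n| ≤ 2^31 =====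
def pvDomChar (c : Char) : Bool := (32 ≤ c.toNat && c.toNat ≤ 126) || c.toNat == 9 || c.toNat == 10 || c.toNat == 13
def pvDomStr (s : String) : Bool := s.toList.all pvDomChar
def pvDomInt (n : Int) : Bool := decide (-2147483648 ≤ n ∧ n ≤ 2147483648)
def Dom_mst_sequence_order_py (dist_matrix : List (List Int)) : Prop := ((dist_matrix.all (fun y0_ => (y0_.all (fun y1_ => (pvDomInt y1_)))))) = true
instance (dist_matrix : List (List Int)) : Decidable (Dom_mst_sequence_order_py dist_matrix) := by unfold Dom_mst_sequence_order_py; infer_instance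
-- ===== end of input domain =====

-- B replaces A's candidate-list + min() vertex selection by an inline argmin scan, drops the
-- adjacency-building pass (children are recomputed from the parent array on demand) and replaces
-- the explicit stack DFS by a recursive pre-order visit; same cost class, no speed claim.

-- ===== PORT A =====

-- stands for Python's float("inf") in key[]; exact on Dom (every |distance| ≤ 2^31 < 2^62,
-- so 'dist < inf' is always true, like in Python)
def pvInf : Int := 2 ^ 62

-- one iteration of A's Prim loop; state is (visited, key, parent).
-- All indices used with getD/set are produced by range(n) or min() over such indices, hence
-- non-negative and (under Pre_) in range, so plain getD/set are exact.
def pvPrimStep (m : List (List Int)) (n : Nat)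
    (st : List Bool × List Int × List Int) : List Bool × List Int × List Int :=
  let visited := st.1
  let key := st.2.1
  let parent := st.2.2
  let candidates := (List.range n).filter (fun idx => !(visited.getD idx false))
  match PySem.List.min? candidates (fun idx => key.getD idx 0) with
  | none => st   -- Python's min([]) would raise ValueError; unreachable: some index is always unvisited
  | some u =>
    let visited' := visited.set u true
    let kp := (List.range n).foldl
      (fun (kp : List Int × List Int) v =>
        if visited'.getD v false || v == u then kp
        else
          let dist := (m.getD u []).getD v 0
          if dist < kp.1.getD v 0 then (kp.1.set v dist, kp.2.set v (u : Int)) else kp)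
      (key, parent)
    (visited', kp.1, kp.2)

-- adjacency[par].append(child) for (child, par) in enumerate(parent) with par >= 0
def pvBuildAdj (parent : List Int) (n : Nat) : List (List Nat) :=
  (PySem.List.enumerate parent 0).foldl
    (fun adj cp =>
      if cp.2 ≥ 0 then adj.set cp.2.toNat ((adj.getD cp.2.toNat []) ++ [cp.1.toNat]) else adj)
    (List.replicate n [])

-- A's 'while stack' loop; the stack top is the LAST list element (Python list.pop()).
-- The fuel only guards termination: the loop runs at most 1 + (number of parent entries ≥ 0)
-- ≤ n + 1 iterations, so fuel n+1 is never exhausted; when the stack is empty the loop stops.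
def pvStackLoop (m : List (List Int)) (adj : List (List Nat)) :
    Nat → List Nat → List Nat → List Nat
  | 0, _, order => order
  | _ + 1, [], order => order
  | f + 1, x :: s, order =>
      let node := (x :: s).getLast (by simp)
      let stack' := (x :: s).dropLast
      let children := PySem.List.sorted (adj.getD node [])
        (fun idx => (m.getD node []).getD idx 0) true
      pvStackLoop m adj f (stack' ++ children) (order ++ [node])

def mst_sequence_order_py (dist_matrix : List (List Int)) : List Int :=
  let n := dist_matrix.length
  if n = 0 then []
  else
    let init : List Bool × List Int × List Int :=
      (List.replicate n false, (List.replicate n pvInf).set 0 0, List.replicate n (-1 : Int))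
    let st := (List.range n).foldl (fun st _ => pvPrimStep dist_matrix n st) init
    let adj := pvBuildAdj st.2.2 n
    (pvStackLoop dist_matrix adj (n + 1) [0] []).map (fun k => (k : Int))

-- ===== PORT B =====

-- B's inline argmin scan: u = -1; for i in range(n): if not in_tree[i] and (u < 0 or key[i] < key[u]): u = i
-- (the short-circuit 'u < 0 or …' means key[u] is only read when u ≥ 0, as in Python)
def pvArgmin (in_tree : List Bool) (key : List Int) (n : Nat) : Int :=
  (List.range n).foldl
    (fun u i =>
      if in_tree.getD i false then u
      else if u < 0 ∨ key.getD i 0 < key.getD u.toNat 0 then (i : Int) else u)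
    (-1)

-- one iteration of B's Prim loop
def pvPrimStepB (m : List (List Int)) (n : Nat)
    (st : List Bool × List Int × List Int) : List Bool × List Int × List Int :=
  let in_tree := st.1
  let key := st.2.1
  let parent := st.2.2
  let u := pvArgmin in_tree key n
  let in_tree' := in_tree.set u.toNat true
  let kp := (List.range n).foldl
    (fun (kp : List Int × List Int) v =>
      if in_tree'.getD v false then kp
      else if (m.getD u.toNat []).getD v 0 < kp.1.getD v 0 then
        (kp.1.set v ((m.getD u.toNat []).getD v 0), kp.2.set v u)
      else kp)
    (key, parent)
  (in_tree', kp.1, kp.2)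

-- sorted((c for c in reversed(range(n)) if parent[c] == u), key=lambda c: dist_matrix[u][c])
def pvChildren (m : List (List Int)) (parent : List Int) (n : Nat) (u : Nat) : List Nat :=
  PySem.List.sorted
    ((List.range n).reverse.filter (fun c => parent.getD c (-1) == (u : Int)))
    (fun c => (m.getD u []).getD c 0) false

-- B's recursive visit; 'b' (structural bound) and 'fuel' together implement one call budget:
-- the budget is threaded left-to-right through the recursive calls, one unit per call.
-- The tree reaches each node at most once, so budget n+1 is never exhausted.
def pvVisit (m : List (List Int)) (parent : List Int) (n : Nat) :
    Nat → Nat → Nat → List Nat → Nat × List Nat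
  | 0, _, _, order => (0, order)
  | _ + 1, 0, _, order => (0, order)
  | b + 1, f + 1, u, order =>
      (pvChildren m parent n u).foldl
        (fun st c => pvVisit m parent n b st.1 c st.2)
        (f, order ++ [u])

def mst_sequence_order_py_alt (dist_matrix : List (List Int)) : List Int :=
  let n := dist_matrix.length
  if n = 0 then []
  else
    let init : List Bool × List Int × List Int :=
      (List.replicate n false, (List.replicate n pvInf).set 0 0, List.replicate n (-1 : Int))
    let st := (List.range n).foldl (fun st _ => pvPrimStepB dist_matrix n st) init
    ((pvVisit dist_matrix st.2.2 n (n + 1) (n + 1) 0 []).2).map (fun k => (k : Int))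

-- ===== PRECONDITION & SPEC =====
-- Pre_ excludes ragged matrices (some row shorter than the matrix itself): on those Python A
-- raises IndexError, except in rare corners where the short row is never read (it belongs to the
-- last-visited childless vertex) and A and B both return the same value anyway.
def Pre_mst_sequence_order_py (dist_matrix : List (List Int)) : Prop :=
  ∀ row ∈ dist_matrix, dist_matrix.length ≤ row.length
instance (dist_matrix : List (List Int)) : Decidable (Pre_mst_sequence_order_py dist_matrix) := by
  unfold Pre_mst_sequence_order_py; infer_instance

def pvWitness_mst_sequence_order_py : List (List Int) := [[0, 7], [7, 0]]

def Spec_mst_sequence_order_py (dist_matrix : List (List Int)) (out : List Int) : Prop := out = mst_sequence_order_py_alt dist_matrix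
instance (dist_matrix : List (List Int)) (out : List Int) : Decidable (Spec_mst_sequence_order_py dist_matrix out) := by unfold Spec_mst_sequence_order_py; infer_instance

-- ===== CLAIM (what is proved, stated in full; the proofs are below) =====
def Claim_equal_mst_sequence_order_py : Prop := ∀ (dist_matrix : List (List Int)), Dom_mst_sequence_order_py dist_matrix → Pre_mst_sequence_order_py dist_matrix → Spec_mst_sequence_order_py dist_matrix (mst_sequence_order_py dist_matrix)


-- ===== LEMMAS AND PROOFS =====

-- ---- generic fold helpers ----
theorem pvFoldlInv {α β : Type} {P : β → Prop} (l : List α) (f : β → α → β) (init : β)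
    (h0 : P init) (hstep : ∀ b a, a ∈ l → P b → P (f b a)) : P (l.foldl f init) := by
  induction l generalizing init with
  | nil => exact h0
  | cons x t ih =>
      exact ih (f init x) (hstep init x (by simp) h0)
        (fun b a ha hb => hstep b a (by simp [ha]) hb)

-- ---- Part I : the two Prim iterations coincide ----

-- B's argmin fold over any index list, related to a first-minimum option fold
theorem pvArgminFold (g : Nat → Bool) (k : Nat → Int) (l : List Nat) :
    ∀ (o : Option Nat),
      l.foldl (fun u i => if g i then u
          else if u < 0 ∨ k i < k u.toNat then (i : Int) else u)
        (match o with | none => (-1 : Int) | some a => (a : Int)) =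
      (match l.foldl (fun o i => if g i then o
          else match o with
            | none => some i
            | some a => if k i < k a then some i else some a) o with
        | none => (-1 : Int) | some a => (a : Int)) := by
  induction l with
  | nil => intro o; rfl
  | cons i t ih =>
      intro o
      simp only [List.foldl_cons]
      by_cases hg : g i = true
      · rw [if_pos hg, if_pos hg]; exact ih o
      · rw [if_neg hg, if_neg hg]
        cases o with
        | none =>
            have hc : ((-1 : Int) < 0 ∨ k i < k ((-1 : Int)).toNat) := Or.inl (by norm_num)
            rw [if_pos hc]
            exact ih (some i)
        | some a =>
            have hnn : ¬((a : Int) < 0) := not_lt.mpr (Int.natCast_nonneg a)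
            have htn : ((a : Int)).toNat = a := Int.toNat_natCast a
            have hred : (match some a with
                | none => some i
                | some a => if k i < k a then some i else some a) =
                (if k i < k a then some i else some a) := rfl
            rw [hred]
            simp only [htn]
            by_cases hk : k i < k a
            · rw [if_pos (Or.inr hk), if_pos hk]
              exact ih (some i)
            · rw [if_neg (fun h => h.elim hnn hk), if_neg hk]
              exact ih (some a)

-- Python's min over the unvisited candidates as an option fold over the index list
theorem pvMinCandidates (g : Nat → Bool) (k : Nat → Int) (l : List Nat) :
    PySem.List.min? (l.filter (fun i => !(g i))) k =
      l.foldl (fun o i => if g i then o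
          else match o with
            | none => some i
            | some a => if k i < k a then some i else some a) none := by
  unfold PySem.List.min?
  rw [List.foldl_filter]
  apply PySem.List.foldl_congr_mem
  intro acc x _
  by_cases hg : g x = true
  · simp [hg]
  · have h1 : (!g x) = true := by simp [hg]
    rw [if_pos h1, if_neg hg]
    cases acc <;> rfl

-- the two inner relax loops are equal once visited'[u] = true
theorem pvInnerEq (m : List (List Int)) (n : Nat) (visited' : List Bool) (u : Nat)
    (hu : visited'.getD u false = true) (kp : List Int × List Int) :
    (List.range n).foldl
      (fun (kp : List Int × List Int) v =>
        if visited'.getD v false || v == u then kp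
        else
          let dist := (m.getD u []).getD v 0
          if dist < kp.1.getD v 0 then (kp.1.set v dist, kp.2.set v (u : Int)) else kp) kp =
    (List.range n).foldl
      (fun (kp : List Int × List Int) v =>
        if visited'.getD v false then kp
        else if (m.getD u []).getD v 0 < kp.1.getD v 0 then
          (kp.1.set v ((m.getD u []).getD v 0), kp.2.set v (u : Int))
        else kp) kp := by
  apply PySem.List.foldl_congr_mem
  intro kp v _
  by_cases h1 : visited'.getD v false = true
  · simp only [List.getD_eq_getElem?_getD] at h1
    simp [h1]
  · have hvu : v ≠ u := by intro h; rw [h, hu] at h1; exact h1 rfl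
    simp only [List.getD_eq_getElem?_getD] at h1
    simp [h1, hvu]

-- invariant carried through the outer Prim loop
def pvPrimInv (n k : Nat) (st : List Bool × List Int × List Int) : Prop :=
  st.1.length = n ∧ st.2.1.length = n ∧ st.2.2.length = n ∧
  st.1.count true = k ∧
  (∀ x ∈ st.2.2, x = -1 ∨ ∃ j : Nat, j < n ∧ x = (j : Int))

theorem pvCountSetTrue (l : List Bool) (u : Nat) (h : l.getD u false = false)
    (hu : u < l.length) : (l.set u true).count true = l.count true + 1 := by
  induction l generalizing u with
  | nil => simp at hu
  | cons a t ih =>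
      cases u with
      | zero =>
          have ha : a = false := by simpa using h
          subst ha
          simp
      | succ u =>
          have h' : t.getD u false = false := by simpa using h
          have hu' : u < t.length := by simpa using hu
          have hset : (a :: t).set (u + 1) true = a :: t.set u true := rfl
          rw [hset]
          simp only [List.count_cons]
          rw [ih u h' hu']
          omega

-- one step: B's step equals A's step and the invariant advances
theorem pvStepEq (m : List (List Int)) (n k : Nat) (st : List Bool × List Int × List Int)
    (hk : k < n) (hinv : pvPrimInv n k st) :
    pvPrimStepB m n st = pvPrimStep m n st ∧ pvPrimInv n (k + 1) (pvPrimStep m n st) := by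
  obtain ⟨hv, hkey, hpar, hcount, hbound⟩ := hinv
  -- an unvisited index exists
  have hex : ∃ i, i < n ∧ st.1.getD i false = false := by
    by_contra hall
    push_neg at hall
    have hAll : ∀ b ∈ st.1, true = b := by
      intro b hb
      obtain ⟨i, hi, hgi⟩ := List.mem_iff_getElem.mp hb
      have h1 := hall i (by omega)
      rw [List.getD_eq_getElem st.1 false hi, hgi] at h1
      cases b
      · exact absurd rfl h1
      · rfl
    have hlen := List.count_eq_length.mpr hAll
    rw [hv, hcount] at hlen
    omega
  obtain ⟨i0, hi0, hi0f⟩ := hex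
  have hmem : i0 ∈ (List.range n).filter (fun idx => !(st.1.getD idx false)) :=
    List.mem_filter.mpr ⟨List.mem_range.mpr hi0, by rw [hi0f]; rfl⟩
  have hne : (List.range n).filter (fun idx => !(st.1.getD idx false)) ≠ [] :=
    List.ne_nil_of_mem hmem
  obtain ⟨u, hu⟩ : ∃ u, PySem.List.min?
      ((List.range n).filter (fun idx => !(st.1.getD idx false)))
      (fun idx => st.2.1.getD idx 0) = some u := by
    cases hmin : PySem.List.min? ((List.range n).filter (fun idx => !(st.1.getD idx false)))
        (fun idx => st.2.1.getD idx 0) with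
    | none => exact absurd ((PySem.List.min?_eq_none_iff _ _).mp hmin) hne
    | some u => exact ⟨u, rfl⟩
  have humem := PySem.List.min?_mem hu
  obtain ⟨hur, hub⟩ := List.mem_filter.mp humem
  have hun : u < n := List.mem_range.mp hur
  have huf : st.1.getD u false = false := by simpa using hub
  -- B's argmin equals u
  have hargmin : pvArgmin st.1 st.2.1 n = (u : Int) := by
    unfold pvArgmin
    have h2 := pvMinCandidates (fun i => st.1.getD i false) (fun i => st.2.1.getD i 0)
      (List.range n)
    have h1 := pvArgminFold (fun i => st.1.getD i false) (fun i => st.2.1.getD i 0)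
      (List.range n) none
    rw [← h2, hu] at h1
    simpa using h1
  -- visited'[u] = true
  have hu' : (st.1.set u true).getD u false = true := by
    rw [List.getD_eq_getElem _ _ (by rw [List.length_set, hv]; exact hun)]
    simp
  constructor
  · -- the two steps are equal
    unfold pvPrimStep pvPrimStepB
    dsimp only
    rw [hu]
    simp only [hargmin, Int.toNat_natCast]
    rw [pvInnerEq m n (st.1.set u true) u hu' (st.2.1, st.2.2)]
  · -- the invariant advances
    unfold pvPrimStep
    dsimp only
    rw [hu]
    simp only
    have hfold := pvFoldlInv (P := fun kp : List Int × List Int =>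
        kp.1.length = n ∧ kp.2.length = n ∧
        (∀ x ∈ kp.2, x = -1 ∨ ∃ j : Nat, j < n ∧ x = (j : Int)))
      (List.range n)
      (fun (kp : List Int × List Int) v =>
        if (st.1.set u true).getD v false || v == u then kp
        else
          let dist := (m.getD u []).getD v 0
          if dist < kp.1.getD v 0 then (kp.1.set v dist, kp.2.set v (u : Int)) else kp)
      (st.2.1, st.2.2)
      ⟨hkey, hpar, hbound⟩
      (by
        intro kp v _ hkp
        obtain ⟨hk1, hk2, hk3⟩ := hkp
        dsimp only
        split_ifs
        · exact ⟨hk1, hk2, hk3⟩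
        · refine ⟨by simpa using hk1, by simpa using hk2, ?_⟩
          intro x hx
          rcases List.mem_or_eq_of_mem_set hx with hmem' | rfl
          · exact hk3 x hmem'
          · exact Or.inr ⟨u, hun, rfl⟩
        · exact ⟨hk1, hk2, hk3⟩)
    refine ⟨by simpa using hv, hfold.1, hfold.2.1, ?_, hfold.2.2⟩
    simpa using pvCountSetTrue st.1 u huf (by rw [hv]; exact hun) ▸
      (by rw [hcount] : st.1.count true + 1 = k + 1)

theorem pvPrimLoopEq (m : List (List Int)) (n : Nat) (init : List Bool × List Int × List Int)
    (hinit : pvPrimInv n 0 init) :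
    ∀ k, k ≤ n →
      (List.range k).foldl (fun st _ => pvPrimStepB m n st) init =
        (List.range k).foldl (fun st _ => pvPrimStep m n st) init ∧
      pvPrimInv n k ((List.range k).foldl (fun st _ => pvPrimStep m n st) init) := by
  intro k
  induction k with
  | zero => intro _; exact ⟨rfl, hinit⟩
  | succ k ih =>
      intro hkn
      obtain ⟨heq, hinv⟩ := ih (by omega)
      obtain ⟨hstep, hinv'⟩ := pvStepEq m n k _ (by omega) hinv
      rw [List.range_succ, List.foldl_append, List.foldl_append]
      simp only [List.foldl_cons, List.foldl_nil]
      exact ⟨by rw [heq, hstep], hinv'⟩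

-- ---- Part II : A's adjacency lists are filters of the parent array ----

theorem pvBuildAdjAux (ps : List Int) :
    ∀ (adj0 : List (List Nat)) (p : Nat), p < adj0.length →
    ((PySem.List.enumerate ps 0).foldl
      (fun adj cp =>
        if cp.2 ≥ 0 then adj.set cp.2.toNat ((adj.getD cp.2.toNat []) ++ [cp.1.toNat]) else adj)
      adj0).getD p [] =
    adj0.getD p [] ++ (List.range ps.length).filter (fun c => ps.getD c (-1) == (p : Int)) := by
  induction ps using List.reverseRecOn with
  | nil => intro adj0 p _; simp [PySem.List.enumerate]
  | append_singleton xs x ih =>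
      intro adj0 p hp
      rw [PySem.List.enumerate_append, List.foldl_append]
      have hone : PySem.List.enumerate [x] ((0 : Int) + xs.length) = [((xs.length : Int), x)] := by
        rw [PySem.List.enumerate_cons]
        simp [PySem.List.enumerate]
      rw [hone]
      simp only [List.foldl_cons, List.foldl_nil]
      have hlen1 : ((PySem.List.enumerate xs 0).foldl
          (fun adj cp =>
            if cp.2 ≥ 0 then adj.set cp.2.toNat ((adj.getD cp.2.toNat []) ++ [cp.1.toNat]) else adj)
          adj0).length = adj0.length := by
        apply pvFoldlInv (P := fun a : List (List Nat) => a.length = adj0.length)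
        · rfl
        · intro b a _ hb
          dsimp only
          split_ifs
          · rw [List.length_set]; exact hb
          · exact hb
      have hpre : ∀ c ∈ List.range xs.length,
          ((xs ++ [x]).getD c (-1) == (p : Int)) = (xs.getD c (-1) == (p : Int)) := by
        intro c hc
        rw [List.getD_append _ _ _ _ (List.mem_range.mp hc)]
      have hlast : (xs ++ [x]).getD xs.length (-1) = x := by
        simp [List.getD_eq_getElem?_getD]
      rw [List.length_append, List.length_singleton, List.range_succ, List.filter_append,
        List.filter_congr hpre]
      simp only [List.filter_cons, List.filter_nil, hlast]
      by_cases hx : x ≥ 0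
      · by_cases hxp : x = (p : Int)
        · have hxt : x.toNat = p := by omega
          rw [if_pos hx, hxt]
          have hp1 : p < ((PySem.List.enumerate xs 0).foldl
              (fun adj cp =>
                if cp.2 ≥ 0 then adj.set cp.2.toNat ((adj.getD cp.2.toNat []) ++ [cp.1.toNat])
                else adj) adj0).length := by
            rw [hlen1]; exact hp
          rw [List.getD_eq_getElem _ _ (by rw [List.length_set]; exact hp1)]
          simp only [List.getElem_set, if_pos rfl]
          rw [← List.getD_eq_getElem _ [] hp1]
          rw [ih adj0 p hp]
          have : (x == (p : Int)) = true := by simp [hxp]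
          rw [this]
          simp [Int.toNat_natCast, List.append_assoc]
        · have hne : (x == (p : Int)) = false := by simp [hxp]
          rw [if_pos hx, hne]
          have hset : ∀ (v : List Nat), ((((PySem.List.enumerate xs 0).foldl
              (fun adj cp => if cp.2 ≥ 0 then
                  adj.set cp.2.toNat ((adj.getD cp.2.toNat []) ++ [cp.1.toNat]) else adj)
              adj0)).set x.toNat v).getD p [] =
              ((PySem.List.enumerate xs 0).foldl
              (fun adj cp => if cp.2 ≥ 0 then
                  adj.set cp.2.toNat ((adj.getD cp.2.toNat []) ++ [cp.1.toNat]) else adj)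
              adj0).getD p [] := by
            intro v
            have hxt : x.toNat ≠ p := by omega
            rw [List.getD_eq_getElem?_getD, List.getElem?_set_ne hxt, ← List.getD_eq_getElem?_getD]
          rw [hset, ih adj0 p hp]
          simp
      · have hne : (x == (p : Int)) = false := by
          have : x ≠ (p : Int) := by omega
          simp [this]
        rw [if_neg hx, hne, ih adj0 p hp]
        simp

theorem pvBuildAdjLength (ps : List Int) (n : Nat) : (pvBuildAdj ps n).length = n := by
  unfold pvBuildAdj
  apply pvFoldlInv (P := fun a : List (List Nat) => a.length = n)
  · simp
  · intro b a _ hb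
    dsimp only
    split_ifs
    · rw [List.length_set]; exact hb
    · exact hb

theorem pvBuildAdjGetD (ps : List Int) (n : Nat) (p : Nat)
    (hb : ∀ x ∈ ps, x = -1 ∨ ∃ j : Nat, j < n ∧ x = (j : Int)) (hlen : ps.length = n) :
    (pvBuildAdj ps n).getD p [] =
      (List.range n).filter (fun c => ps.getD c (-1) == (p : Int)) := by
  by_cases hp : p < n
  · unfold pvBuildAdj
    rw [pvBuildAdjAux ps (List.replicate n []) p (by simpa using hp)]
    rw [hlen]
    have : (List.replicate n ([] : List Nat)).getD p [] = [] := by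
      rw [List.getD_eq_getElem _ _ (by simpa using hp)]
      simp
    rw [this, List.nil_append]
  · have h1 : (pvBuildAdj ps n).getD p [] = [] :=
      List.getD_eq_default _ _ (by rw [pvBuildAdjLength]; omega)
    have h2 : (List.range n).filter (fun c => ps.getD c (-1) == (p : Int)) = [] := by
      apply List.filter_eq_nil_iff.mpr
      intro c hc
      have hcn : c < n := List.mem_range.mp hc
      have hmem : ps.getD c (-1) ∈ ps := by
        rw [List.getD_eq_getElem _ _ (by omega)]
        exact List.getElem_mem _
      rcases hb _ hmem with h | ⟨j, hj, h⟩
      · rw [h]; simp only [beq_iff_eq]; omega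
      · rw [h]; simp only [beq_iff_eq]; intro hc; rw [Int.natCast_inj] at hc; omega
    rw [h1, h2]

-- ---- Part III : sorting stability; A's reversed descending sort = B's ascending sort ----

-- the target ordering: ascending key, ties by DESCENDING index
def pvRa (k : Nat → Int) (a b : Nat) : Prop := k a < k b ∨ (k a = k b ∧ b < a)

theorem pvInsertAscPairwise (k : Nat → Int) (x : Nat) (acc : List Nat)
    (hacc : acc.Pairwise (pvRa k)) (hx : ∀ y ∈ acc, x < y) :
    (PySem.List.insertBy (fun a b => decide (k a < k b)) x acc).Pairwise (pvRa k) := by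
  induction acc with
  | nil => exact List.pairwise_singleton _ _
  | cons y ys ih =>
      rw [show PySem.List.insertBy (fun a b => decide (k a < k b)) x (y :: ys) =
        if decide (k x < k y) then x :: y :: ys
        else y :: PySem.List.insertBy (fun a b => decide (k a < k b)) x ys from rfl]
      obtain ⟨hy, hys⟩ := List.pairwise_cons.mp hacc
      by_cases hxy : k x < k y
      · rw [if_pos (by simpa using hxy)]
        refine List.pairwise_cons.mpr ⟨?_, hacc⟩
        intro z hz
        rcases List.mem_cons.mp hz with rfl | hz'
        · exact Or.inl hxy
        · rcases hy z hz' with h | ⟨h, _⟩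
          · exact Or.inl (lt_trans hxy h)
          · exact Or.inl (h ▸ hxy)
      · rw [if_neg (by simpa using hxy)]
        refine List.pairwise_cons.mpr ⟨?_, ih hys (fun z hz => hx z (List.mem_cons_of_mem _ hz))⟩
        intro z hz
        rcases (PySem.List.insertBy_mem_iff _ _ _ _).mp hz with rfl | hz'
        · rcases lt_or_eq_of_le (not_lt.mp hxy) with h | h
          · exact Or.inl h
          · exact Or.inr ⟨h, hx y (List.mem_cons_self)⟩
        · exact hy z hz'

theorem pvInsertDescPairwise (k : Nat → Int) (x : Nat) (acc : List Nat)
    (hacc : acc.Pairwise (fun a b => k b < k a ∨ (k a = k b ∧ a < b)))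
    (hx : ∀ y ∈ acc, y < x) :
    (PySem.List.insertBy (fun a b => decide (k b < k a)) x acc).Pairwise
      (fun a b => k b < k a ∨ (k a = k b ∧ a < b)) := by
  induction acc with
  | nil => exact List.pairwise_singleton _ _
  | cons y ys ih =>
      rw [show PySem.List.insertBy (fun a b => decide (k b < k a)) x (y :: ys) =
        if decide (k y < k x) then x :: y :: ys
        else y :: PySem.List.insertBy (fun a b => decide (k b < k a)) x ys from rfl]
      obtain ⟨hy, hys⟩ := List.pairwise_cons.mp hacc
      by_cases hxy : k y < k x
      · rw [if_pos (by simpa using hxy)]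
        refine List.pairwise_cons.mpr ⟨?_, hacc⟩
        intro z hz
        rcases List.mem_cons.mp hz with rfl | hz'
        · exact Or.inl hxy
        · rcases hy z hz' with h | ⟨h, _⟩
          · exact Or.inl (lt_trans h hxy)
          · exact Or.inl (h ▸ hxy)
      · rw [if_neg (by simpa using hxy)]
        refine List.pairwise_cons.mpr ⟨?_, ih hys (fun z hz => hx z (List.mem_cons_of_mem _ hz))⟩
        intro z hz
        rcases (PySem.List.insertBy_mem_iff _ _ _ _).mp hz with rfl | hz'
        · rcases lt_or_eq_of_le (not_lt.mp hxy) with h | h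
          · exact Or.inl h
          · exact Or.inr ⟨h.symm, hx y (List.mem_cons_self)⟩
        · exact hy z hz'

theorem pvSortedAscPairwise (k : Nat → Int) (l : List Nat)
    (hl : l.Pairwise (fun a b => b < a)) :
    (PySem.List.sorted l k false).Pairwise (pvRa k) := by
  rw [PySem.List.sorted_eq_foldl_insertBy]
  have aux : ∀ (t acc : List Nat), acc.Pairwise (pvRa k) →
      (∀ y ∈ acc, ∀ z ∈ t, z < y) → t.Pairwise (fun a b => b < a) →
      (t.foldl (fun acc x => PySem.List.insertBy (fun a b => decide (k a < k b)) x acc)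
        acc).Pairwise (pvRa k) := by
    intro t
    induction t with
    | nil => intro acc h _ _; exact h
    | cons x t iht =>
        intro acc hacc hsep ht
        obtain ⟨hxt, ht'⟩ := List.pairwise_cons.mp ht
        simp only [List.foldl_cons]
        apply iht
        · exact pvInsertAscPairwise k x acc hacc
            (fun y hy => hsep y hy x (List.mem_cons_self))
        · intro y hy z hz
          rcases (PySem.List.insertBy_mem_iff _ _ _ _).mp hy with rfl | hy'
          · exact hxt z hz
          · exact hsep y hy' z (List.mem_cons_of_mem _ hz)
        · exact ht'
  exact aux l [] (List.Pairwise.nil) (by simp) hl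

theorem pvSortedDescRevPairwise (k : Nat → Int) (l : List Nat)
    (hl : l.Pairwise (fun a b => a < b)) :
    ((PySem.List.sorted l k true).reverse).Pairwise (pvRa k) := by
  rw [List.pairwise_reverse]
  have main : (PySem.List.sorted l k true).Pairwise
      (fun a b => k b < k a ∨ (k a = k b ∧ a < b)) := by
    rw [PySem.List.sorted_rev_eq_foldl_insertBy]
    have aux : ∀ (t acc : List Nat),
        acc.Pairwise (fun a b => k b < k a ∨ (k a = k b ∧ a < b)) →
        (∀ y ∈ acc, ∀ z ∈ t, y < z) → t.Pairwise (fun a b => a < b) →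
        (t.foldl (fun acc x => PySem.List.insertBy (fun a b => decide (k b < k a)) x acc)
          acc).Pairwise (fun a b => k b < k a ∨ (k a = k b ∧ a < b)) := by
      intro t
      induction t with
      | nil => intro acc h _ _; exact h
      | cons x t iht =>
          intro acc hacc hsep ht
          obtain ⟨hxt, ht'⟩ := List.pairwise_cons.mp ht
          simp only [List.foldl_cons]
          apply iht
          · exact pvInsertDescPairwise k x acc hacc
              (fun y hy => hsep y hy x (List.mem_cons_self))
          · intro y hy z hz
            rcases (PySem.List.insertBy_mem_iff _ _ _ _).mp hy with rfl | hy'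
            · exact hxt z hz
            · exact hsep y hy' z (List.mem_cons_of_mem _ hz)
          · exact ht'
    exact aux l [] (List.Pairwise.nil) (by simp) hl
  apply main.imp
  intro a b h
  unfold pvRa
  rcases h with h | ⟨h, h'⟩
  · exact Or.inl h
  · exact Or.inr ⟨h.symm, h'⟩

theorem pvRaUnique (k : Nat → Int) (l1 l2 : List Nat) (hp : l1.Perm l2)
    (h1 : l1.Pairwise (pvRa k)) (h2 : l2.Pairwise (pvRa k)) : l1 = l2 := by
  apply hp.eq_of_pairwise (le := pvRa k) _ h1 h2
  intro a b _ _ hab hba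
  unfold pvRa at hab hba
  rcases hab with h | ⟨e, h⟩ <;> rcases hba with h' | ⟨e', h'⟩ <;> omega

-- A's push list equals B's child list
theorem pvChildrenEq (m : List (List Int)) (parent : List Int) (n : Nat) (u : Nat)
    (hb : ∀ x ∈ parent, x = -1 ∨ ∃ j : Nat, j < n ∧ x = (j : Int)) (hlen : parent.length = n) :
    (PySem.List.sorted ((pvBuildAdj parent n).getD u [])
      (fun idx => (m.getD u []).getD idx 0) true).reverse =
    pvChildren m parent n u := by
  rw [pvBuildAdjGetD parent n u hb hlen]
  unfold pvChildren
  rw [List.filter_reverse]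
  have hLp : ((List.range n).filter
      (fun c => parent.getD c (-1) == (u : Int))).Pairwise (fun a b => a < b) :=
    List.Pairwise.sublist List.filter_sublist List.pairwise_lt_range
  apply pvRaUnique (fun idx => (m.getD u []).getD idx 0)
  · exact ((List.reverse_perm _).trans (PySem.List.sorted_perm _ _ _)).trans
      (((PySem.List.sorted_perm _ _ _).trans (List.reverse_perm _)).symm)
  · exact pvSortedDescRevPairwise _ _ hLp
  · exact pvSortedAscPairwise _ _ (List.pairwise_reverse.mpr (hLp.imp (fun h => h)))

-- ---- Part IV : the stack machine and the budgeted recursion produce the same order ----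

-- head-top stack machine (proof-side normal form of A's loop)
def pvStk (sc : Nat → List Nat) : Nat → List Nat → List Nat → List Nat
  | 0, _, acc => acc
  | _ + 1, [], acc => acc
  | f + 1, u :: s, acc => pvStk sc f (sc u ++ s) (acc ++ [u])

theorem pvStk_nil (sc : Nat → List Nat) (f : Nat) (acc : List Nat) :
    pvStk sc f [] acc = acc := by
  cases f <;> rfl

theorem pvStk_cons (sc : Nat → List Nat) (f : Nat) (u : Nat) (s acc : List Nat) :
    pvStk sc (f + 1) (u :: s) acc = pvStk sc f (sc u ++ s) (acc ++ [u]) := rfl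

theorem pvStkCongr (sc1 sc2 : Nat → List Nat) (h : ∀ u, sc1 u = sc2 u) :
    ∀ f s acc, pvStk sc1 f s acc = pvStk sc2 f s acc := by
  intro f
  induction f with
  | zero => intro s acc; rfl
  | succ f ih =>
      intro s acc
      cases s with
      | nil => rfl
      | cons u s =>
          simp only [pvStk]
          rw [h u]
          exact ih _ _

theorem pvStackLoopEqStk (m : List (List Int)) (adj : List (List Nat)) :
    ∀ (f : Nat) (s order : List Nat),
      pvStackLoop m adj f s order =
      pvStk (fun u => (PySem.List.sorted (adj.getD u [])
        (fun idx => (m.getD u []).getD idx 0) true).reverse) f s.reverse order := by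
  intro f
  induction f with
  | zero => intro s order; rfl
  | succ f ih =>
      intro s order
      cases s with
      | nil => rfl
      | cons x xs =>
          have hsplit : x :: xs = (x :: xs).dropLast ++ [(x :: xs).getLast (by simp)] :=
            (List.dropLast_append_getLast _).symm
          simp only [pvStackLoop]
          rw [ih]
          conv_rhs => rw [hsplit, List.reverse_append, List.reverse_singleton,
            List.singleton_append, pvStk_cons]
          rw [List.reverse_append]

theorem pvVisitFstLe (m : List (List Int)) (parent : List Int) (n : Nat) :
    ∀ b f u order, (pvVisit m parent n b f u order).1 ≤ f := by
  intro b
  induction b with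
  | zero => intro f u order; simp [pvVisit]
  | succ b ih =>
      intro f u order
      cases f with
      | zero => simp [pvVisit]
      | succ f =>
          have aux : ∀ (L : List Nat) (st : Nat × List Nat),
              (L.foldl (fun st c => pvVisit m parent n b st.1 c st.2) st).1 ≤ st.1 := by
            intro L
            induction L with
            | nil => intro st; exact le_refl _
            | cons c t iht =>
                intro st
                exact le_trans (iht _) (ih st.1 c st.2)
          simp only [pvVisit]
          exact le_trans (aux _ _) (by omega)

theorem pvVisitFoldFstLe (m : List (List Int)) (parent : List Int) (n b : Nat)
    (L : List Nat) (st : Nat × List Nat) :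
    (L.foldl (fun st c => pvVisit m parent n b st.1 c st.2) st).1 ≤ st.1 := by
  induction L generalizing st with
  | nil => exact le_refl _
  | cons c t iht => exact le_trans (iht _) (pvVisitFstLe m parent n b st.1 c st.2)

theorem pvStkEqVisit (m : List (List Int)) (parent : List Int) (n : Nat) :
    ∀ (f b : Nat), f ≤ b → ∀ (L s acc : List Nat),
      pvStk (pvChildren m parent n) f (L ++ s) acc =
      (fun r : Nat × List Nat => pvStk (pvChildren m parent n) r.1 s r.2)
        (L.foldl (fun st c => pvVisit m parent n b st.1 c st.2) (f, acc)) := by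
  intro f
  induction f using Nat.strong_induction_on with
  | _ f IH =>
    intro b hfb L s acc
    match f with
    | 0 =>
        have aux : ∀ (L acc : List Nat),
            (L.foldl (fun st c => pvVisit m parent n b st.1 c st.2) (0, acc)) = (0, acc) := by
          intro L
          induction L with
          | nil => intro acc; rfl
          | cons c t iht =>
              intro acc
              have h0 : pvVisit m parent n b 0 c acc = (0, acc) := by cases b <;> rfl
              simp only [List.foldl_cons, h0]
              exact iht acc
        rw [aux]
        rfl
    | f + 1 =>
        cases L with
        | nil => rfl
        | cons u L' =>
            obtain ⟨b', rfl⟩ : ∃ b', b = b' + 1 := ⟨b - 1, by omega⟩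
            show pvStk (pvChildren m parent n) f (pvChildren m parent n u ++ (L' ++ s))
                (acc ++ [u]) = _
            rw [IH f (by omega) b' (by omega) (pvChildren m parent n u) (L' ++ s) (acc ++ [u])]
            dsimp only
            have hle : ((pvChildren m parent n u).foldl
                (fun st c => pvVisit m parent n b' st.1 c st.2) (f, acc ++ [u])).1 ≤ f :=
              pvVisitFoldFstLe m parent n b' _ _
            rw [IH ((pvChildren m parent n u).foldl
                (fun st c => pvVisit m parent n b' st.1 c st.2) (f, acc ++ [u])).1
              (by omega) (b' + 1) (by omega) L' s _]
            simp only [List.foldl_cons]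
            rfl

-- ---- final glue ----

theorem pvMainEq (dm : List (List Int)) :
    mst_sequence_order_py dm = mst_sequence_order_py_alt dm := by
  unfold mst_sequence_order_py mst_sequence_order_py_alt
  by_cases hn : dm.length = 0
  · simp [hn]
  · simp only [hn, if_neg, ite_false]
    have hinit : pvPrimInv dm.length 0
        (List.replicate dm.length false,
          (List.replicate dm.length pvInf).set 0 0,
          List.replicate dm.length (-1 : Int)) := by
      refine ⟨by simp, by simp, by simp, by simp [List.count_replicate], ?_⟩
      intro x hx
      exact Or.inl (List.eq_of_mem_replicate hx)
    obtain ⟨heq, hinv⟩ := pvPrimLoopEq dm dm.length _ hinit dm.length (le_refl _)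
    rw [heq]
    obtain ⟨_, _, hplen, _, hpbound⟩ := hinv
    set st := (List.range dm.length).foldl (fun st _ => pvPrimStep dm dm.length st)
      (List.replicate dm.length false,
        (List.replicate dm.length pvInf).set 0 0,
        List.replicate dm.length (-1 : Int)) with hst
    congr 1
    rw [pvStackLoopEqStk]
    rw [List.reverse_singleton]
    rw [pvStkCongr _ (pvChildren dm st.2.2 dm.length)
      (fun u => pvChildrenEq dm st.2.2 dm.length u hpbound hplen)]
    have h1 := pvStkEqVisit dm st.2.2 dm.length (dm.length + 1) (dm.length + 1) (le_refl _)
      [0] [] []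
    rw [List.append_nil] at h1
    rw [h1]
    simp only [List.foldl_cons, List.foldl_nil]
    rw [pvStk_nil]

-- ===== VERDICT (by name: the statement is the Claim_ definition above) =====
theorem mst_sequence_order_py_spec : Claim_equal_mst_sequence_order_py := by
  intro dm _ _
  unfold Spec_mst_sequence_order_py
  exact pvMainEq dm
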